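-- pv_equiv track=rewrite | github.com/Nelinger91/Projects | Chords and lyrics/tag_all_words.py | get_chord_per_word
-- ===== SOURCE A (Python) =====
-- from itertools import repeat
--
-- def get_chord_per_word(words_sent, chords_sent):
--     num_words = len(words_sent)
--     num_chords = len(chords_sent)
--
--     if num_words > num_chords:
--         chord_per_word_list = []
--         repeat_chord_n_times = num_words // num_chords  # floor
--
--         for chord in chords_sent:
--             chord_per_word_list.extend(repeat(chord, repeat_chord_n_times))
--         while len(chord_per_word_list) != len(words_sent):
--             chord_per_word_list.append(chord_per_word_list[-1])  # add last chord until same length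
--         return zip(words_sent, chord_per_word_list)
--
--     else:  # num_words <= num_chords
--         return zip(words_sent, chords_sent)
-- ===== SOURCE B (Python) =====
-- def get_chord_per_word(words_sent, chords_sent):
--     num_words = len(words_sent)
--     num_chords = len(chords_sent)
--     if num_words > num_chords:
--         floor = num_words // num_chords
--         chords = [chords_sent[min(i // floor, num_chords - 1)] for i in range(num_words)]
--         return zip(words_sent, chords)
--     return zip(words_sent, chords_sent)
-- ===== Notes on version B (the rewrite author's own statement) =====
-- stated objective: simpler
-- what changed: Replaces A's two-phase construction (extend each chord floor times, then a while-loop padding with the last chord) by one indexed pass over word positions using the closed form chords_sent[min(i // floor, num_chords - 1)].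
import Mathlib
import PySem

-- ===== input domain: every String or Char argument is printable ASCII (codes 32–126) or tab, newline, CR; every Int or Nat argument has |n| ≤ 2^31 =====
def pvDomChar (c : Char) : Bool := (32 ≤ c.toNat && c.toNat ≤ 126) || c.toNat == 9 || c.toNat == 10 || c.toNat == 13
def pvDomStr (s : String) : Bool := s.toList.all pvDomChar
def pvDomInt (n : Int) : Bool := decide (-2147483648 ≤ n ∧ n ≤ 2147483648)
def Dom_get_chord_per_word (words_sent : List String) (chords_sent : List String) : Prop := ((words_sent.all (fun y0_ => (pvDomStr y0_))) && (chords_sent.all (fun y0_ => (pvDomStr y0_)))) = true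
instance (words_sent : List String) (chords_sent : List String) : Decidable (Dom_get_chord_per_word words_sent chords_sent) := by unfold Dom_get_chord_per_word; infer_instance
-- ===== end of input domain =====

-- B replaces A's two-phase build (repeat each chord floor times, then while-pad with the last
-- chord) by one indexed pass i ↦ chords_sent[min(i // floor, num_chords - 1)]  (objective: simpler).
-- Both Pythons return zip objects; the equivalence is about the produced pair sequence.

-- ===== PORT A =====
-- the 'while len != len(words): append last' loop, as recursion on the deficit
-- (under Pre_ the list never exceeds the target, where Python's loop would diverge)
def padLoop (target : Nat) (acc : List String) : List String :=
  if acc.length < target then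
    padLoop target (acc ++ [PySem.List.pyGetD acc (-1) ""])
  else acc
termination_by target - acc.length
decreasing_by simp; omega

def get_chord_per_word (words_sent : List String) (chords_sent : List String) : List (String × String) :=
  let num_words : Int := words_sent.length
  let num_chords : Int := chords_sent.length
  if num_words > num_chords then
    let repeat_chord_n_times := PySem.Int.floordiv num_words num_chords
    let chord_per_word_list :=
      chords_sent.foldl (fun acc chord => acc ++ List.replicate repeat_chord_n_times.toNat chord) []
    words_sent.zip (padLoop words_sent.length chord_per_word_list)
  else
    words_sent.zip chords_sent

-- ===== PORT B =====
def get_chord_per_word_alt (words_sent : List String) (chords_sent : List String) : List (String × String) :=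
  let num_words : Int := words_sent.length
  let num_chords : Int := chords_sent.length
  if num_words > num_chords then
    let floor := PySem.Int.floordiv num_words num_chords
    let chords := (PySem.List.pyRange 0 num_words 1).map
      (fun i => PySem.List.pyGetD chords_sent (min (PySem.Int.floordiv i floor) (num_chords - 1)) "")
    words_sent.zip chords
  else
    words_sent.zip chords_sent

-- ===== PRECONDITION & SPEC =====
-- Pre_ excludes nonempty words_sent with empty chords_sent, where both A and B raise
-- ZeroDivisionError (num_words // num_chords with num_chords == 0).
def Pre_get_chord_per_word (words_sent : List String) (chords_sent : List String) : Prop :=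
  chords_sent ≠ [] ∨ words_sent = []
instance (words_sent : List String) (chords_sent : List String) : Decidable (Pre_get_chord_per_word words_sent chords_sent) := by unfold Pre_get_chord_per_word; infer_instance

def pvWitness_get_chord_per_word : List String × List String := (["a", "b", "c", "d", "e"], ["C", "G"])

def Spec_get_chord_per_word (words_sent : List String) (chords_sent : List String) (out : List (String × String)) : Prop := out = get_chord_per_word_alt words_sent chords_sent
instance (words_sent : List String) (chords_sent : List String) (out : List (String × String)) : Decidable (Spec_get_chord_per_word words_sent chords_sent out) := by unfold Spec_get_chord_per_word; infer_instance

-- ===== CLAIM (what is proved, stated in full; the proofs are below) =====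
def Claim_equal_get_chord_per_word : Prop := ∀ (words_sent : List String) (chords_sent : List String), Dom_get_chord_per_word words_sent chords_sent → Pre_get_chord_per_word words_sent chords_sent → Spec_get_chord_per_word words_sent chords_sent (get_chord_per_word words_sent chords_sent)

-- ===== LEMMAS AND PROOFS =====

-- A's fold phase builds flatMap (replicate r)
theorem foldA_eq_flatMap (cs : List String) (r : Nat) :
    cs.foldl (fun acc chord => acc ++ List.replicate r chord) [] =
      cs.flatMap (List.replicate r) := by
  simpa using PySem.List.foldl_append_eq_flatMap (g := List.replicate r) (l := cs) (acc := [])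

theorem length_flatMap_replicate (cs : List String) (r : Nat) :
    (cs.flatMap (List.replicate r)).length = cs.length * r := by
  induction cs with
  | nil => simp
  | cons x xs ih => simp [List.flatMap_cons, ih]; ring

theorem getElem_flatMap_replicate (cs : List String) (r : Nat) (hr : 0 < r)
    (i : Nat) (hi : i < cs.length * r)
    (h1 : i < (cs.flatMap (List.replicate r)).length) (h2 : i / r < cs.length) :
    (cs.flatMap (List.replicate r))[i] = cs[i / r] := by
  induction cs generalizing i with
  | nil => simp at hi
  | cons x xs ih =>
    rw [List.length_cons, Nat.succ_mul] at hi
    by_cases h : i < r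
    · simp only [List.flatMap_cons]
      rw [List.getElem_append_left (by simpa using h)]
      simp [Nat.div_eq_of_lt h]
    · have hi' : i - r < xs.length * r := by omega
      have hq : (i - r) / r < xs.length :=
        Nat.div_lt_of_lt_mul (Nat.mul_comm xs.length r ▸ hi')
      simp only [List.flatMap_cons]
      rw [List.getElem_append_right (by simpa using h)]
      have hdiv : i / r = (i - r) / r + 1 := by
        conv_lhs => rw [← Nat.sub_add_cancel (le_of_not_gt h)]
        rw [Nat.add_div_right _ hr]
      simp only [List.length_replicate]
      rw [ih (i - r) hi' (by rw [length_flatMap_replicate]; exact hi') hq]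
      have hstep : (x :: xs)[i / r]'h2 = xs[(i - r) / r]'hq := by
        simp only [hdiv, List.getElem_cons_succ]
      exact hstep.symm

-- the while-pad loop appends the (fixed) last element until the target length
theorem padLoop_eq (target : Nat) (acc : List String) (h : acc ≠ []) :
    padLoop target acc = acc ++ List.replicate (target - acc.length) (acc.getLast h) := by
  by_cases hlt : acc.length < target
  · have hstep := padLoop_eq target (acc ++ [acc.getLast h]) (by simp)
    have hlast2 : (acc ++ [acc.getLast h]).getLast (by simp) = acc.getLast h := by simp
    rw [padLoop, if_pos hlt,
      show PySem.List.pyGetD acc (-1) "" = acc.getLast h from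
        PySem.List.pyGetD_neg_one acc "" h,
      hstep, hlast2, List.append_assoc]
    congr 1
    have hlen : (acc ++ [acc.getLast h]).length = acc.length + 1 := by simp
    rw [hlen]
    have hs : target - acc.length = (target - (acc.length + 1)) + 1 := by omega
    rw [hs, List.replicate_succ]
    rfl
  · rw [padLoop, if_neg hlt]
    have : target - acc.length = 0 := by omega
    simp [this]
termination_by target - acc.length
decreasing_by simp; omega

-- the heart (Nat level): A's padded chord list is the indexed comprehension
theorem chordList_core (cs : List String) (nw r : Nat) (hc : cs ≠ [])
    (hrpos : 0 < r) (hle : cs.length * r ≤ nw) :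
    padLoop nw (cs.flatMap (List.replicate r)) =
      (List.range nw).map (fun i => cs.getD (min (i / r) (cs.length - 1)) "") := by
  have hclen : 0 < cs.length := List.length_pos_iff.mpr hc
  have hbaselen : (cs.flatMap (List.replicate r)).length = cs.length * r :=
    length_flatMap_replicate cs r
  have hpos : 0 < cs.length * r := Nat.mul_pos hclen hrpos
  have hcomm : cs.length * r = r * cs.length := Nat.mul_comm _ _
  have hbase_ne : cs.flatMap (List.replicate r) ≠ [] :=
    List.ne_nil_of_length_pos (by omega)
  have hidx : ((cs.flatMap (List.replicate r)).length - 1) / r = cs.length - 1 := by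
    rw [hbaselen]
    have hk : r ≤ cs.length * r := Nat.le_mul_of_pos_left r hclen
    have hsub : (cs.length - 1) * r = cs.length * r - 1 * r := by rw [Nat.sub_mul]
    refine Nat.div_eq_of_lt_le (by omega) ?_
    have hm : cs.length - 1 + 1 = cs.length := by omega
    rw [hm]; omega
  have hlast : (cs.flatMap (List.replicate r)).getLast hbase_ne =
      cs.getD (cs.length - 1) "" := by
    rw [List.getLast_eq_getElem]
    rw [getElem_flatMap_replicate cs r hrpos ((cs.flatMap (List.replicate r)).length - 1)
      (by omega) (by omega) (by rw [hidx]; omega)]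
    simp only [hidx]
    rw [List.getD_eq_getElem?_getD, List.getElem?_eq_getElem (by omega), Option.getD_some]
  rw [padLoop_eq _ _ hbase_ne, hlast]
  apply List.ext_getElem
  · simp [hbaselen]; omega
  · intro i hL hR
    have hi : i < nw := by simpa using hR
    rw [List.getElem_map, List.getElem_range]
    by_cases hcase : i < cs.length * r
    · rw [List.getElem_append_left (by rw [hbaselen]; exact hcase)]
      have hlt : i / r < cs.length := Nat.div_lt_of_lt_mul (by omega)
      rw [getElem_flatMap_replicate cs r hrpos i hcase (by rw [hbaselen]; exact hcase) hlt]
      have hmin : min (i / r) (cs.length - 1) = i / r := by omega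
      rw [hmin, List.getD_eq_getElem?_getD, List.getElem?_eq_getElem hlt, Option.getD_some]
    · rw [List.getElem_append_right (by rw [hbaselen]; omega)]
      rw [List.getElem_replicate]
      have hge : cs.length ≤ i / r := (Nat.le_div_iff_mul_le hrpos).mpr (by omega)
      have hmin : min (i / r) (cs.length - 1) = cs.length - 1 := by omega
      rw [hmin]

-- ===== VERDICT (by name: the statement is the Claim_ definition above) =====
theorem get_chord_per_word_spec : Claim_equal_get_chord_per_word := by
  intro ws cs _ hpre
  unfold Spec_get_chord_per_word get_chord_per_word get_chord_per_word_alt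
  by_cases hgt : (cs.length : Int) < (ws.length : Int)
  · have hgtN : cs.length < ws.length := by exact_mod_cast hgt
    have hc : cs ≠ [] := by
      rcases hpre with h | h
      · exact h
      · rw [h] at hgtN; simp at hgtN
    have hclen : 0 < cs.length := List.length_pos_iff.mpr hc
    simp only [gt_iff_lt, if_pos hgt]
    rw [foldA_eq_flatMap]
    have hfl : (PySem.Int.floordiv (ws.length : Int) (cs.length : Int)).toNat =
        ws.length / cs.length := by
      rw [PySem.Int.floordiv_natCast]; exact Int.toNat_natCast _
    rw [hfl]
    have hrpos : 0 < ws.length / cs.length := Nat.div_pos (le_of_lt hgtN) hclen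
    have hdm := Nat.div_mul_le_self ws.length cs.length
    have hle : cs.length * (ws.length / cs.length) ≤ ws.length := by
      rw [Nat.mul_comm]; exact hdm
    rw [chordList_core cs ws.length (ws.length / cs.length) hc hrpos hle]
    congr 1
    rw [PySem.List.pyRange_one, List.map_map]
    simp only [sub_zero, Int.toNat_natCast]
    apply List.map_congr_left
    intro k hk
    have hk' : k < ws.length := List.mem_range.mp hk
    simp only [Function.comp_apply]
    rw [show (0 : Int) + (k : Int) = ((k : Nat) : Int) by omega]
    rw [PySem.Int.floordiv_natCast, PySem.Int.floordiv_natCast]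
    rw [show ((cs.length : Nat) : Int) - 1 = ((cs.length - 1 : Nat) : Int) by omega]
    rw [← Nat.cast_min, PySem.List.pyGetD_natCast]
  · simp only [gt_iff_lt, if_neg hgt]
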